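-- pv_equiv track=rewrite | github.com/pypi-data/pypi-mirror-60 | packages/mhelper/mhelper-1.0.1.76.tar.gz/mhelper-1.0.1.76/mhelper/array_helper.py | when_first_or_last
-- ===== SOURCE A (Python) =====
-- from typing import List, Optional, Iterator, Tuple, Dict, Iterable, Union, TypeVar, Callable, Sequence, Type, Collection, Reversible, Generic
--
-- T = TypeVar( "T" )
--
-- def when_first_or_last( iterable: Iterable[T] ) -> (T, bool, bool):
--     is_first = True
--     last_item = None
--     has_yielded_first = True
--
--     for item in iterable:
--         if not is_first:
--             yield last_item, has_yielded_first, False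
--             has_yielded_first = False
--         else:
--             is_first = False
--
--         last_item = item
--
--     if not is_first:
--         yield last_item, has_yielded_first, True
-- ===== SOURCE B (Python) =====
-- def when_first_or_last(iterable):
--     items = list(iterable)
--     n = len(items)
--     for i, x in enumerate(items):
--         yield x, i == 0, i == n - 1
-- ===== Notes on version B (the rewrite author's own statement) =====
-- stated objective: simpler
-- what changed: B materializes the iterable and computes the first/last flags directly from the index and the known length, dropping A's is_first/last_item/has_yielded_first one-item-lookahead flag machinery (note: B is eager, so it differs from A's laziness in side-effect timing, but yields the identical finite sequence).
import Mathlib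
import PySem

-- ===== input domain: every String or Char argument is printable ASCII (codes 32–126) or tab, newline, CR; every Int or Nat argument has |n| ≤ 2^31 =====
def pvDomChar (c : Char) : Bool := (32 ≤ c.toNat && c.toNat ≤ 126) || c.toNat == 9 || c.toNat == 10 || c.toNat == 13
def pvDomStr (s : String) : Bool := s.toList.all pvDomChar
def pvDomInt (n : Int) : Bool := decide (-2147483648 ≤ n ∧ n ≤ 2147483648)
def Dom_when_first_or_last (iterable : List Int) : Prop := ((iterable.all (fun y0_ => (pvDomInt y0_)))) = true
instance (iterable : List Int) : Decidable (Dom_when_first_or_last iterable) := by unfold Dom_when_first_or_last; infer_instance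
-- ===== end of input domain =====

-- B replaces A's is_first/last_item/has_yielded_first lookahead machinery by indexing a
-- materialized list (B is eager where A is lazy; the returned finite sequence is identical).

-- ===== PORT A =====
-- loop state: (is_first, last_item, has_yielded_first, yielded-so-far);
-- last_item starts as None (Option Int); it is only yielded when is_first is false,
-- where it is always `some`, so `.getD 0` is never the default on a reachable yield.
def when_first_or_last (iterable : List Int) : List (Int × Bool × Bool) :=
  let st := iterable.foldl
    (fun (s : Bool × Option Int × Bool × List (Int × Bool × Bool)) item =>
      let (is_first, last_item, has_yielded_first, acc) := s
      if ¬ is_first then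
        (is_first, some item, false, acc ++ [(last_item.getD 0, has_yielded_first, false)])
      else
        (false, some item, has_yielded_first, acc))
    (true, none, true, [])
  let (is_first, last_item, has_yielded_first, acc) := st
  if ¬ is_first then acc ++ [(last_item.getD 0, has_yielded_first, true)] else acc

-- ===== PORT B =====
def when_first_or_last_alt (iterable : List Int) : List (Int × Bool × Bool) :=
  let n : Int := iterable.length
  (PySem.List.enumerate iterable).map (fun p => (p.2, p.1 == 0, p.1 == n - 1))

-- ===== PRECONDITION & SPEC =====
def Spec_when_first_or_last (iterable : List Int) (out : List (Int × Bool × Bool)) : Prop := out = when_first_or_last_alt iterable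
instance (iterable : List Int) (out : List (Int × Bool × Bool)) : Decidable (Spec_when_first_or_last iterable out) := by unfold Spec_when_first_or_last; infer_instance

-- ===== CLAIM (what is proved, stated in full; the proofs are below) =====
def Claim_equal_when_first_or_last : Prop := ∀ (iterable : List Int), Dom_when_first_or_last iterable → Spec_when_first_or_last iterable (when_first_or_last iterable)

-- ===== LEMMAS AND PROOFS =====

-- reference shape: tag p hyf l = what A yields after the first item p has been buffered
def tagRest (p : Int) (hyf : Bool) : List Int → List (Int × Bool × Bool)
  | [] => [(p, hyf, true)]
  | x :: xs => (p, hyf, false) :: tagRest x false xs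

theorem foldA_eq_tagRest (l : List Int) (p : Int) (hyf : Bool)
    (acc : List (Int × Bool × Bool)) :
    (let st := l.foldl
        (fun (s : Bool × Option Int × Bool × List (Int × Bool × Bool)) item =>
          let (is_first, last_item, has_yielded_first, a) := s
          if ¬ is_first then
            (is_first, some item, false, a ++ [(last_item.getD 0, has_yielded_first, false)])
          else
            (false, some item, has_yielded_first, a))
        (false, some p, hyf, acc)
      let (is_first, last_item, has_yielded_first, a) := st
      if ¬ is_first then a ++ [(last_item.getD 0, has_yielded_first, true)] else a)
    = acc ++ tagRest p hyf l := by
  induction l generalizing p hyf acc with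
  | nil => simp [tagRest]
  | cons x xs ih =>
    simp only [List.foldl_cons, tagRest]
    have := ih x false (acc ++ [(p, hyf, false)])
    simpa using this

theorem key_tagRest (xs : List Int) : ∀ (q s : Int), 0 < s →
    ((q, (s == (0:Int) : Bool), (s == (s + xs.length : Int) : Bool)) ::
      (PySem.List.enumerate xs (s+1)).map
        (fun p => (p.2, (p.1 == (0:Int) : Bool), (p.1 == (s + xs.length : Int) : Bool))))
    = tagRest q false xs := by
  induction xs with
  | nil =>
    intro q s hs
    simp [tagRest, PySem.List.enumerate, show ¬ (s = (0:Int)) by omega]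
  | cons y ys ih =>
    intro q s hs
    have h2 := ih y (s+1) (by omega)
    simp only [PySem.List.enumerate_cons, List.map_cons, tagRest, List.length_cons]
    push_cast
    rw [show s + ((ys.length : Int) + 1) = (s+1) + (ys.length : Int) by ring]
    rw [show ((s == (0:Int)) : Bool) = false by simp; omega,
        show ((s == (s+1) + (ys.length:Int)) : Bool) = false by simp; omega]
    rw [← h2]

theorem alt_cons_eq_tagRest (l : List Int) (p : Int) :
    when_first_or_last_alt (p :: l) = tagRest p true l := by
  cases l with
  | nil =>
    simp [when_first_or_last_alt, tagRest, PySem.List.enumerate]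
  | cons y ys =>
    unfold when_first_or_last_alt
    simp only [PySem.List.enumerate_cons, List.map_cons, List.length_cons]
    push_cast
    rw [show (ys.length : Int) + 1 + 1 - 1 = 1 + (ys.length : Int) by ring]
    have h := key_tagRest ys y 1 (by norm_num)
    rw [show ((1:Int)+1) = 2 by ring, show (((1:Int) == (0:Int)) : Bool) = false by simp] at h
    rw [show (((0:Int) == 1 + (ys.length:Int)) : Bool) = false by simp; omega, h]
    rfl

-- ===== VERDICT (by name: the statement is the Claim_ definition above) =====
theorem when_first_or_last_spec : Claim_equal_when_first_or_last := by
  intro l _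
  unfold Spec_when_first_or_last
  cases l with
  | nil => rfl
  | cons x xs =>
    rw [alt_cons_eq_tagRest]
    unfold when_first_or_last
    simp only [List.foldl_cons]
    have h := foldA_eq_tagRest xs x true []
    simpa using h
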